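-- pv_equiv track=rewrite | github.com/sata-bench/sata-bench | src/satabench/metrics/metrics.py | difference_between_lists
-- ===== SOURCE A (Python) =====
-- from typing import Dict, List, List, Tuple
--
-- def difference_between_lists(
--     l1: List[str], l2: List[str]
-- ) -> Tuple[List[str], List[str]]:
--     """Return per‑sample symmetric set differences *l1 \ l2* and *l2 \ l1*."""
--     diff_1, diff_2 = [], []
--     for a, b in zip(l1, l2):
--         diff_1.append("".join(sorted(set(a) - set(b))))
--         diff_2.append("".join(sorted(set(b) - set(a))))
--     return diff_1, diff_2
-- ===== SOURCE B (Python) =====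
-- def difference_between_lists(l1, l2):
--     """Two-pointer merge over the sorted unique characters of each string:
--     characters only in a go to d1, only in b go to d2, common ones skipped."""
--     diff_1, diff_2 = [], []
--     for a, b in zip(l1, l2):
--         xs, ys = sorted(set(a)), sorted(set(b))
--         i = j = 0
--         d1, d2 = [], []
--         while i < len(xs) and j < len(ys):
--             if xs[i] < ys[j]:
--                 d1.append(xs[i]); i += 1
--             elif ys[j] < xs[i]:
--                 d2.append(ys[j]); j += 1
--             else:
--                 i += 1; j += 1
--         d1.extend(xs[i:]); d2.extend(ys[j:])
--         diff_1.append("".join(d1)); diff_2.append("".join(d2))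
--     return diff_1, diff_2
-- ===== Notes on version B (the rewrite author's own statement) =====
-- stated objective: alternative
-- what changed: Per pair, instead of two set subtractions each followed by its own sort, B sorts each string's distinct characters once and runs a classic two-pointer merge over the two sorted sequences, routing a-only characters to d1 and b-only to d2 and skipping matches; no set-difference operation is performed.
import Mathlib
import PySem

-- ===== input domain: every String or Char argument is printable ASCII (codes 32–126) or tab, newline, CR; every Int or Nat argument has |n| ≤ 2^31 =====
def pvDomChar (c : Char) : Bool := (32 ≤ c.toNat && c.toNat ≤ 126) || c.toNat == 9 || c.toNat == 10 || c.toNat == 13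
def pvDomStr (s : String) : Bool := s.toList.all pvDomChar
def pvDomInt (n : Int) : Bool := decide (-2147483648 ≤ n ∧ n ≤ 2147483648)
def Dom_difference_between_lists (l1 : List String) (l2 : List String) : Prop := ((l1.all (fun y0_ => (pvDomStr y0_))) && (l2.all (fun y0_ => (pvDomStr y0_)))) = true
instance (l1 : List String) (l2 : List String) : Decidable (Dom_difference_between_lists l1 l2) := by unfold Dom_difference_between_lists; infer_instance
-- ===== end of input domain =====

-- B replaces the per-pair set subtractions by a two-pointer merge of the two
-- sorted unique-character sequences (alternative decomposition, same cost).

-- ===== PORT A =====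
-- "".join(sorted(set(a) - set(b)))
def aDiff (a : String) (b : String) : String :=
  String.ofList (PySem.List.sorted
    (PySem.Set.diff (PySem.Set.ofList a.toList) (PySem.Set.ofList b.toList))
    (fun c => c) false)

def difference_between_lists (l1 : List String) (l2 : List String) : List String × List String :=
  (List.zip l1 l2).foldl
    (fun (acc : List String × List String) p =>
      (acc.1 ++ [aDiff p.1 p.2], acc.2 ++ [aDiff p.2 p.1]))
    ([], [])

-- ===== PORT B =====
-- the while loop with two indices, as structural recursion on the two suffixes;
-- the trailing d1.extend(xs[i:]) / d2.extend(ys[j:]) are the base cases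
def bMerge : List Char → List Char → List Char × List Char
  | [], ys => ([], ys)
  | x :: xs, [] => (x :: xs, [])
  | x :: xs, y :: ys =>
    if x < y then
      let m := bMerge xs (y :: ys); (x :: m.1, m.2)
    else if y < x then
      let m := bMerge (x :: xs) ys; (m.1, y :: m.2)
    else
      bMerge xs ys
termination_by xs ys => xs.length + ys.length

def bPair (a : String) (b : String) : String × String :=
  (String.ofList (bMerge (PySem.List.sorted (PySem.Set.ofList a.toList) (fun c => c) false)
                         (PySem.List.sorted (PySem.Set.ofList b.toList) (fun c => c) false)).1,
   String.ofList (bMerge (PySem.List.sorted (PySem.Set.ofList a.toList) (fun c => c) false)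
                         (PySem.List.sorted (PySem.Set.ofList b.toList) (fun c => c) false)).2)

def difference_between_lists_alt (l1 : List String) (l2 : List String) : List String × List String :=
  (List.zip l1 l2).foldl
    (fun (acc : List String × List String) p =>
      (acc.1 ++ [(bPair p.1 p.2).1], acc.2 ++ [(bPair p.1 p.2).2]))
    ([], [])

-- ===== PRECONDITION & SPEC =====
def Spec_difference_between_lists (l1 : List String) (l2 : List String) (out : List String × List String) : Prop := out = difference_between_lists_alt l1 l2
instance (l1 : List String) (l2 : List String) (out : List String × List String) : Decidable (Spec_difference_between_lists l1 l2 out) := by unfold Spec_difference_between_lists; infer_instance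

-- ===== CLAIM (what is proved, stated in full; the proofs are below) =====
def Claim_equal_difference_between_lists : Prop := ∀ (l1 : List String) (l2 : List String), Dom_difference_between_lists l1 l2 → Spec_difference_between_lists l1 l2 (difference_between_lists l1 l2)

-- ===== LEMMAS AND PROOFS =====

-- On strictly increasing inputs the merge yields the two one-sided filters.
theorem bMerge_eq (xs ys : List Char)
    (hxs : xs.Pairwise (· < ·)) (hys : ys.Pairwise (· < ·)) :
    bMerge xs ys = (xs.filter (fun c => !ys.contains c),
                    ys.filter (fun c => !xs.contains c)) := by
  induction xs generalizing ys with
  | nil =>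
    cases ys with
    | nil => simp [bMerge]
    | cons y ys => simp [bMerge]
  | cons x xs ih =>
    induction ys with
    | nil => simp [bMerge]
    | cons y ys ihy =>
      have hxs' : xs.Pairwise (· < ·) := (List.pairwise_cons.mp hxs).2
      have hys' : ys.Pairwise (· < ·) := (List.pairwise_cons.mp hys).2
      have hxall : ∀ c ∈ xs, x < c := (List.pairwise_cons.mp hxs).1
      have hyall : ∀ c ∈ ys, y < c := (List.pairwise_cons.mp hys).1
      rcases lt_trichotomy x y with hlt | heq | hgt
      · -- x < y : emit x
        have hxnot : ∀ c ∈ y :: ys, x < c := by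
          intro c hc
          rcases List.mem_cons.mp hc with h | h
          · exact h ▸ hlt
          · exact lt_trans hlt (hyall c h)
        rw [bMerge, if_pos hlt, ih (y :: ys) hxs' hys]
        simp only [Prod.mk.injEq]
        constructor
        · rw [List.filter_cons_of_pos (by
            simp only [Bool.not_eq_true', List.contains_eq_mem, decide_eq_false_iff_not]
            intro h
            exact lt_irrefl x (hxnot x h))]
        · refine (List.filter_congr ?_).symm
          intro c hc
          have hxc : x < c := hxnot c hc
          simp [List.contains_eq_mem, (ne_of_lt hxc).symm]
      · -- x = y : drop both heads
        subst heq
        rw [bMerge, if_neg (lt_irrefl x), if_neg (lt_irrefl x), ih ys hxs' hys']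
        simp only [Prod.mk.injEq]
        constructor
        · rw [List.filter_cons_of_neg (by simp)]
          refine (List.filter_congr ?_).symm
          intro c hc
          have : x < c := hxall c hc
          simp [List.contains_eq_mem, (ne_of_lt this).symm]
        · rw [List.filter_cons_of_neg (by simp)]
          refine (List.filter_congr ?_).symm
          intro c hc
          have : x < c := hyall c hc
          simp [List.contains_eq_mem, (ne_of_lt this).symm]
      · -- y < x : emit y
        have hynot : ∀ c ∈ x :: xs, y < c := by
          intro c hc
          rcases List.mem_cons.mp hc with h | h
          · exact h ▸ hgt
          · exact lt_trans hgt (hxall c h)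
        rw [bMerge, if_neg (by exact fun h => lt_irrefl x (lt_trans h hgt)),
            if_pos hgt, ihy hys']
        simp only [Prod.mk.injEq]
        constructor
        · refine (List.filter_congr ?_).symm
          intro c hc
          have hyc : y < c := hynot c hc
          simp [List.contains_eq_mem, (ne_of_lt hyc).symm]
        · rw [List.filter_cons_of_pos (by
            simp only [Bool.not_eq_true', List.contains_eq_mem, decide_eq_false_iff_not]
            intro h
            exact lt_irrefl y (hynot y h))]

-- sorted(set(a)-set(b)) is the filter of the sorted a-side by non-membership in the sorted b-side
theorem sorted_diff_eq_filter (a b : List Char) :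
    PySem.List.sorted (PySem.Set.diff (PySem.Set.ofList a) (PySem.Set.ofList b)) (fun c => c) false
    = (PySem.List.sorted (PySem.Set.ofList a) (fun c => c) false).filter
        (fun c => !(PySem.List.sorted (PySem.Set.ofList b) (fun c => c) false).contains c) := by
  set xs := PySem.List.sorted (PySem.Set.ofList a) (fun c : Char => c) false with hxs
  have hlt : xs.Pairwise (· < ·) := PySem.List.sorted_ofList_pairwise_lt a
  have hnd : xs.Nodup := hlt.nodup
  refine PySem.List.sorted_eq_of_perm_of_pairwise_lt _ _ _ ?_ ?_
  · -- the filtered list is a permutation of set(a) - set(b)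
    refine (List.perm_ext_iff_of_nodup (hnd.filter _)
      (PySem.Set.nodup_diff _ _ (PySem.Set.nodup_ofList a))).mpr ?_
    intro c
    have hxm : c ∈ xs ↔ c ∈ PySem.Set.ofList a := PySem.List.mem_sorted _ _ _ _
    have hym : c ∈ PySem.List.sorted (PySem.Set.ofList b) (fun c : Char => c) false
        ↔ c ∈ PySem.Set.ofList b := PySem.List.mem_sorted _ _ _ _
    simp only [List.mem_filter, PySem.Set.mem_diff, hxm, Bool.not_eq_true',
      List.contains_eq_mem, decide_eq_false_iff_not, hym]
  · simpa using hlt.filter _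

theorem bPair_eq (a b : String) : bPair a b = (aDiff a b, aDiff b a) := by
  unfold bPair aDiff
  rw [bMerge_eq _ _ (PySem.List.sorted_ofList_pairwise_lt a.toList)
      (PySem.List.sorted_ofList_pairwise_lt b.toList)]
  rw [← sorted_diff_eq_filter a.toList b.toList, ← sorted_diff_eq_filter b.toList a.toList]

theorem outer_eq (l : List (String × String)) (acc : List String × List String) :
    l.foldl (fun (acc : List String × List String) p =>
        (acc.1 ++ [aDiff p.1 p.2], acc.2 ++ [aDiff p.2 p.1])) acc
    = l.foldl (fun (acc : List String × List String) p =>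
        (acc.1 ++ [(bPair p.1 p.2).1], acc.2 ++ [(bPair p.1 p.2).2])) acc := by
  induction l generalizing acc with
  | nil => rfl
  | cons p l ih => simp [List.foldl_cons, bPair_eq, ih]

-- ===== VERDICT (by name: the statement is the Claim_ definition above) =====
theorem difference_between_lists_spec : Claim_equal_difference_between_lists := by
  intro l1 l2 _
  unfold Spec_difference_between_lists difference_between_lists difference_between_lists_alt
  exact outer_eq _ _
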